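-- pv_equiv track=rewrite | github.com/mavalos90/codewars_katas | python/6_kyu/adjacent_repeated_words.py | count_adjacent_pairs
-- ===== SOURCE A (Python) =====
-- def count_adjacent_pairs(st):
--     count = 0
--     word = ''
--     lst = st.split(' ')
--     for i in range(1, len(lst)):
--         if lst[i-1].lower() == lst[i].lower():
--             if lst[i-1].lower() != word:
--                 word = lst[i-1].lower()
--                 count += 1
--         else: word = ''
--     return count
-- ===== SOURCE B (Python) =====
-- def count_adjacent_pairs(st):
--     # Build the runs of consecutive case-insensitively equal words, then count
--     # the runs of length >= 2 (runs of '' come from repeated spaces, not words).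
--     runs = []
--     for w in st.split(' '):
--         k = w.lower()
--         if runs and runs[-1][0] == k:
--             runs[-1][1] += 1
--         else:
--             runs.append([k, 1])
--     return sum(1 for k, n in runs if k != '' and n >= 2)
-- ===== Notes on version B (the rewrite author's own statement) =====
-- stated objective: alternative
-- what changed: A scans adjacent index pairs while tracking the most recently counted lowered word as dedup state; B first materializes the runs of consecutive case-insensitively equal words as a (key, length) list and then counts the runs with nonempty key and length at least 2.
import Mathlib
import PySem

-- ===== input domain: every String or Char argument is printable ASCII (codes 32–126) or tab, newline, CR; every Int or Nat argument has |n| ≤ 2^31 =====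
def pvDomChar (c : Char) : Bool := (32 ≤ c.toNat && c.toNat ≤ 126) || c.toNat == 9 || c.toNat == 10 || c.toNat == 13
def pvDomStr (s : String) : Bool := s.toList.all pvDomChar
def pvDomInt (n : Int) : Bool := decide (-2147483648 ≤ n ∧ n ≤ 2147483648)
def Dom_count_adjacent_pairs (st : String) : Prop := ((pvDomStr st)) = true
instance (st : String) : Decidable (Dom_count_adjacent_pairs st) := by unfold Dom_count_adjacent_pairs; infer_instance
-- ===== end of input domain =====

-- B replaces A's adjacent-pair scan with explicit run building then size filtering (alternative decomposition, same cost).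

-- ===== PORT A =====
-- A's loop body over indices i of lst (count, word as the pair state); lst = st.split(' ')
def pvBodyA (lst : List String) (s : Int × String) (i : Int) : Int × String :=
  if PySem.Str.lower (PySem.List.pyGetD lst (i - 1) "") =
     PySem.Str.lower (PySem.List.pyGetD lst i "") then
    if PySem.Str.lower (PySem.List.pyGetD lst (i - 1) "") ≠ s.2 then
      (s.1 + 1, PySem.Str.lower (PySem.List.pyGetD lst (i - 1) ""))
    else s
  else (s.1, "")

def count_adjacent_pairs (st : String) : Int :=
  ((PySem.List.pyRange 1 (PySem.List.len ((PySem.Str.split? st " ").getD [])) 1).foldl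
    (pvBodyA ((PySem.Str.split? st " ").getD [])) ((0 : Int), "")).1

-- ===== PORT B =====
-- one loop iteration of B: extend the last run or open a new one
def pvStepB (runs : List (String × Int)) (w : String) : List (String × Int) :=
  match runs.getLast? with
  | some (k0, n0) =>
      if k0 = PySem.Str.lower w then runs.dropLast ++ [(k0, n0 + 1)]
      else runs ++ [(PySem.Str.lower w, 1)]
  | none => runs ++ [(PySem.Str.lower w, 1)]

def count_adjacent_pairs_alt (st : String) : Int :=
  ((((PySem.Str.split? st " ").getD []).foldl pvStepB []).map
    (fun r => if r.1 ≠ "" ∧ 2 ≤ r.2 then (1 : Int) else 0)).sum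

-- ===== PRECONDITION & SPEC =====
def Spec_count_adjacent_pairs (st : String) (out : Int) : Prop := out = count_adjacent_pairs_alt st
instance (st : String) (out : Int) : Decidable (Spec_count_adjacent_pairs st out) := by unfold Spec_count_adjacent_pairs; infer_instance

-- ===== CLAIM (what is proved, stated in full; the proofs are below) =====
def Claim_equal_count_adjacent_pairs : Prop := ∀ (st : String), Dom_count_adjacent_pairs st → Spec_count_adjacent_pairs st (count_adjacent_pairs st)

-- ===== LEMMAS AND PROOFS =====

-- A's loop as a recursion over the word list (prev carries the lowered previous word)
def pvF : List String → String → Int → String → Int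
  | [], _, c, _ => c
  | w :: ws, prev, c, word =>
      if PySem.Str.lower w = prev then
        (if prev ≠ word then pvF ws (PySem.Str.lower w) (c + 1) prev
         else pvF ws (PySem.Str.lower w) c word)
      else pvF ws (PySem.Str.lower w) c ""

-- B's run tally as a recursion (k = key of the open run, n = its length so far)
def pvG : List String → String → Int → Int
  | [], k, n => if k ≠ "" ∧ 2 ≤ n then 1 else 0
  | w :: ws, k, n =>
      if PySem.Str.lower w = k then pvG ws k (n + 1)
      else (if k ≠ "" ∧ 2 ≤ n then 1 else 0) + pvG ws (PySem.Str.lower w) 1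

def pvTally (runs : List (String × Int)) : Int :=
  (runs.map (fun r => if r.1 ≠ "" ∧ 2 ≤ r.2 then (1 : Int) else 0)).sum

theorem pvStepB_ne_nil (l : List (String × Int)) (w : String) : pvStepB l w ≠ [] := by
  unfold pvStepB
  cases h : l.getLast? with
  | none => simp
  | some r => rcases r with ⟨k0, n0⟩; by_cases hk : k0 = PySem.Str.lower w <;> simp [hk]

theorem pvStepB_append_one (acc l : List (String × Int)) (w : String) (hl : l ≠ []) :
    pvStepB (acc ++ l) w = acc ++ pvStepB l w := by
  obtain ⟨l', r, rfl⟩ := (List.eq_nil_or_concat l).resolve_left hl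
  rw [List.concat_eq_append]
  rcases r with ⟨k0, n0⟩
  unfold pvStepB
  rw [← List.append_assoc]
  by_cases hk : k0 = PySem.Str.lower w <;>
    simp [hk, List.append_assoc]

theorem pvStepB_append (ws : List String) (acc l : List (String × Int)) (hl : l ≠ []) :
    ws.foldl pvStepB (acc ++ l) = acc ++ ws.foldl pvStepB l := by
  induction ws generalizing l with
  | nil => simp
  | cons w ws ih =>
      rw [List.foldl_cons, List.foldl_cons, pvStepB_append_one acc l w hl]
      exact ih _ (pvStepB_ne_nil l w)

theorem pvTally_append (a b : List (String × Int)) : pvTally (a ++ b) = pvTally a + pvTally b := by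
  simp [pvTally]

theorem pvTally_foldl (ws : List String) (k : String) (n : Int) :
    pvTally (ws.foldl pvStepB [(k, n)]) = pvG ws k n := by
  induction ws generalizing k n with
  | nil => simp [pvTally, pvG]
  | cons w ws ih =>
      simp only [List.foldl_cons, pvG]
      by_cases h : PySem.Str.lower w = k
      · have : pvStepB [(k, n)] w = [(k, n + 1)] := by
          unfold pvStepB; simp [h]
        rw [this, ih, if_pos h]
      · have hk : ¬ k = PySem.Str.lower w := fun e => h e.symm
        have hstep : pvStepB [(k, n)] w = [(k, n)] ++ [(PySem.Str.lower w, 1)] := by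
          unfold pvStepB; simp [hk]
        rw [hstep, if_neg h, pvStepB_append ws [(k, n)] [(PySem.Str.lower w, 1)] (by simp),
          pvTally_append, ih]
        simp [pvTally]

theorem pvG_eps (ws : List String) (n m : Int) : pvG ws "" n = pvG ws "" m := by
  induction ws generalizing n m with
  | nil => simp [pvG]
  | cons w ws ih =>
      simp only [pvG]
      by_cases h : PySem.Str.lower w = ""
      · rw [if_pos h]; rw [if_pos h]; exact ih (n + 1) (m + 1)
      · simp [h]

theorem pvF_pvG (ws : List String) (prev : String) (c : Int) :
    (pvF ws prev c "" = c + pvG ws prev 1) ∧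
    (∀ n : Int, 2 ≤ n → prev ≠ "" → pvF ws prev c prev = c - 1 + pvG ws prev n) := by
  induction ws generalizing prev c with
  | nil =>
      constructor
      · simp [pvF, pvG]
      · intro n hn hp; simp [pvF, pvG, hp, hn]
  | cons w ws ih =>
      constructor
      · show pvF (w :: ws) prev c "" = c + pvG (w :: ws) prev 1
        simp only [pvF, pvG]
        by_cases h : PySem.Str.lower w = prev
        · rw [if_pos h, if_pos h]
          by_cases hp : prev = ""
          · rw [if_neg (by simp [hp]), h, hp, (ih "" c).1]
            exact congrArg _ (pvG_eps ws 1 2)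
          · rw [if_pos hp, h, (ih prev (c + 1)).2 2 (by norm_num) hp]
            ring_nf
        · rw [if_neg h, if_neg h, (ih (PySem.Str.lower w) c).1]
          simp
      · intro n hn hp
        show pvF (w :: ws) prev c prev = c - 1 + pvG (w :: ws) prev n
        simp only [pvF, pvG]
        by_cases h : PySem.Str.lower w = prev
        · rw [if_pos h, if_neg (by simp), h, (ih prev c).2 (n + 1) (by omega) hp]
          simp
        · rw [if_neg h, if_neg h, (ih (PySem.Str.lower w) c).1, if_pos ⟨hp, hn⟩]
          ring_nf

-- A's indexed range loop equals pvF over the suffix of the word list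
theorem pvRangeLoop (lst : List String) :
    ∀ (rest : List String) (a : Nat) (p word : String) (c : Int),
    lst.drop a = p :: rest →
    ((PySem.List.pyRange ((a : Int) + 1) (PySem.List.len lst) 1).foldl
      (pvBodyA lst) (c, word)).1
    = pvF rest (PySem.Str.lower p) c word := by
  intro rest
  induction rest with
  | nil =>
      intro a p word c hdrop
      have hlen : lst.length = a + 1 := by
        have := congrArg List.length hdrop
        simp [List.length_drop] at this
        omega
      rw [PySem.List.pyRange_one_eq_nil (by simp [PySem.List.len, hlen])]
      simp [pvF]
  | cons w rest ih =>
      intro a p word c hdrop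
      have hlen : a + 1 < lst.length := by
        have := congrArg List.length hdrop
        simp [List.length_drop] at this
        omega
      have hp : lst[a]? = some p := by
        have : (lst.drop a)[0]? = some p := by rw [hdrop]; rfl
        simpa using this
      have hw : lst[a + 1]? = some w := by
        have : (lst.drop a)[1]? = some w := by rw [hdrop]; rfl
        simpa [Nat.add_comm] using this
      have hga : PySem.List.pyGetD lst ((a : Int) + 1 - 1) "" = p := by
        rw [show ((a : Int) + 1 - 1) = ((a : Nat) : Int) by ring]
        rw [PySem.List.pyGetD_natCast]
        simp [List.getD, hp]
      have hgw : PySem.List.pyGetD lst ((a : Int) + 1) "" = w := by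
        rw [show ((a : Int) + 1) = (((a + 1 : Nat)) : Int) by push_cast; ring]
        rw [PySem.List.pyGetD_natCast]
        simp [List.getD, hw]
      have hdrop' : lst.drop (a + 1) = w :: rest := by
        have := congrArg List.tail hdrop
        simpa [List.tail_drop] using this
      rw [PySem.List.pyRange_one_cons (by simp [PySem.List.len]; exact_mod_cast hlen)]
      rw [List.foldl_cons]
      simp only [pvBodyA, hga, hgw]
      have ihx := fun word c => ih (a + 1) w word c hdrop'
      by_cases h : PySem.Str.lower p = PySem.Str.lower w
      · rw [if_pos h]
        by_cases h2 : PySem.Str.lower p ≠ word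
        · rw [if_pos h2]
          rw [show ((a : Int) + 1 + 1) = (((a + 1 : Nat) : Int) + 1) by push_cast; ring]
          rw [ihx (PySem.Str.lower p) (c + 1)]
          simp [pvF, h.symm, h2]
        · rw [if_neg h2]
          rw [show ((a : Int) + 1 + 1) = (((a + 1 : Nat) : Int) + 1) by push_cast; ring]
          rw [ihx word c]
          simp [pvF, h.symm, h2]
      · rw [if_neg h]
        rw [show ((a : Int) + 1 + 1) = (((a + 1 : Nat) : Int) + 1) by push_cast; ring]
        rw [ihx "" c]
        have h' : ¬ PySem.Str.lower w = PySem.Str.lower p := fun e => h e.symm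
        simp [pvF, h']

theorem count_adjacent_pairs_eq (st : String) :
    count_adjacent_pairs st = count_adjacent_pairs_alt st := by
  cases hsplit : (PySem.Str.split? st " ").getD [] with
  | nil =>
      unfold count_adjacent_pairs count_adjacent_pairs_alt
      rw [hsplit, PySem.List.pyRange_one_eq_nil (by simp [PySem.List.len])]
      simp
  | cons w0 ws =>
      unfold count_adjacent_pairs count_adjacent_pairs_alt
      rw [hsplit]
      have hA := pvRangeLoop (w0 :: ws) ws 0 w0 "" 0 (by simp)
      simp only [Nat.cast_zero, zero_add] at hA
      rw [hA]
      have hB0 : pvStepB [] w0 = [(PySem.Str.lower w0, 1)] := by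
        unfold pvStepB; simp
      have hB : pvTally ((w0 :: ws).foldl pvStepB []) = pvG ws (PySem.Str.lower w0) 1 := by
        rw [List.foldl_cons, hB0, pvTally_foldl]
      rw [show ((((w0 :: ws).foldl pvStepB []).map
            (fun r => if r.1 ≠ "" ∧ 2 ≤ r.2 then (1 : Int) else 0)).sum)
          = pvTally ((w0 :: ws).foldl pvStepB []) from rfl, hB]
      have := (pvF_pvG ws (PySem.Str.lower w0) 0).1
      omega

-- ===== VERDICT (by name: the statement is the Claim_ definition above) =====
theorem count_adjacent_pairs_spec : Claim_equal_count_adjacent_pairs := by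
  intro st _
  unfold Spec_count_adjacent_pairs
  exact count_adjacent_pairs_eq st
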